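-- pv_equiv track=rewrite | github.com/checkeredhat/zork | tests/parse_transcripts.py | parse_cleaned_transcript
-- ===== SOURCE A (Python) =====
-- def parse_cleaned_transcript(cleaned_text):
--     """
--     Parses a cleaned transcript into a structured list of command/output pairs.
--     Assumes the transcript has '>' prompts before every command.
--     """
--     interactions = []
--     current_command = None
--     current_output = []
--
--     for line in cleaned_text.split('\n'):
--         line = line.strip()
--         if not line:
--             continue
--
--         if line.startswith('>'):
--             # If we have a pending command, save it
--             if current_command is not None:
--                 interactions.append({
--                     "command": current_command,
--                     "expected_output": '\n'.join(current_output).strip()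
--                 })
--
--             current_command = line[1:].strip()
--             current_output = []
--         elif current_command is not None:
--             current_output.append(line)
--
--     # Add the last interaction
--     if current_command is not None:
--         interactions.append({
--             "command": current_command,
--             "expected_output": '\n'.join(current_output).strip()
--         })
--
--     return interactions
-- ===== SOURCE B (Python) =====
-- def parse_cleaned_transcript(cleaned_text):
--     """
--     Parses a cleaned transcript into a structured list of command/output pairs.
--     Span-based decomposition: pre-clean the lines once, then cut the list into
--     command-headed segments instead of carrying loop state.
--     """
--     lines = [s for s in (l.strip() for l in cleaned_text.split('\n')) if s]
--     result = []
--     while lines: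
--         head = lines[0]
--         if not head.startswith('>'):
--             lines = lines[1:]
--             continue
--         k = 1
--         while k < len(lines) and not lines[k].startswith('>'):
--             k += 1
--         result.append({
--             "command": head[1:].strip(),
--             "expected_output": '\n'.join(lines[1:k]).strip()
--         })
--         lines = lines[k:]
--     return result
-- ===== Notes on version B (the rewrite author's own statement) =====
-- stated objective: alternative
-- what changed: Replaces A's single stateful loop (pending-command flag plus accumulating output buffer, flushed on the next prompt and at the end) by a two-phase span decomposition: first clean and filter the lines, then repeatedly cut off one command-headed segment and emit it directly, so no pending state or final flush exists.
import Mathlib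
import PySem

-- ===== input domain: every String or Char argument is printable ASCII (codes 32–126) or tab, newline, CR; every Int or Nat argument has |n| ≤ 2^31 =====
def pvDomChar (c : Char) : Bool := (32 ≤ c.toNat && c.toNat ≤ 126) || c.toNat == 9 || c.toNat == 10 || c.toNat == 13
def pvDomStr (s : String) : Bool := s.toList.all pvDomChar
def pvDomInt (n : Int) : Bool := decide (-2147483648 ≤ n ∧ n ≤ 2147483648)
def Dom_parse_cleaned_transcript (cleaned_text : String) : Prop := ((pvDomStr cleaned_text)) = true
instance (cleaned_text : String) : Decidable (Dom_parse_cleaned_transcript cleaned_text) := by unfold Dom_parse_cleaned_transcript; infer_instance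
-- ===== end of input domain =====

-- B replaces A's single stateful loop (pending command + output buffer) by a two-phase
-- span decomposition (clean the lines, then cut off command-headed segments); alternative, same cost.

-- ===== PORT A =====
-- one interaction dict
def pvMk (c o : String) : List (String × String) :=
  [("command", c), ("expected_output", o)]

-- line.startswith('>') (shared test)
def pvIsCmd (s : String) : Bool := PySem.Str.startswith s ">"

-- loop body of A: state = (interactions, current_command, current_output)
def pvStepA (st : List (List (String × String)) × Option String × List String)
    (line0 : String) : List (List (String × String)) × Option String × List String :=
  let line := PySem.Str.strip line0
  if line = "" then st
  else if pvIsCmd line then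
    let interactions :=
      match st.2.1 with
      | some c => st.1 ++ [pvMk c (PySem.Str.strip (PySem.Str.join "\n" st.2.2))]
      | none => st.1
    (interactions, some (PySem.Str.strip (PySem.Str.slice line (some 1) none)), [])
  else
    match st.2.1 with
    | some _ => (st.1, st.2.1, st.2.2 ++ [line])
    | none => st

-- the trailing "if current_command is not None: append"
def pvFinishA (st : List (List (String × String)) × Option String × List String) :
    List (List (String × String)) :=
  match st.2.1 with
  | some c => st.1 ++ [pvMk c (PySem.Str.strip (PySem.Str.join "\n" st.2.2))]
  | none => st.1

def parse_cleaned_transcript (cleaned_text : String) : List (List (String × String)) :=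
  pvFinishA (((PySem.Str.split? cleaned_text "\n").getD []).foldl pvStepA ([], none, []))

-- ===== PORT B =====
def pvLines (cleaned_text : String) : List String :=
  (((PySem.Str.split? cleaned_text "\n").getD []).map PySem.Str.strip).filter (fun s => s ≠ "")

-- the while loop of B: cut off one command-headed segment at a time
def pvGo : List String → List (List (String × String))
  | [] => []
  | head :: rest =>
    if pvIsCmd head then
      pvMk (PySem.Str.strip (PySem.Str.slice head (some 1) none))
           (PySem.Str.strip (PySem.Str.join "\n" (rest.takeWhile (fun x => !pvIsCmd x))))
        :: pvGo (rest.dropWhile (fun x => !pvIsCmd x))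
    else pvGo rest
termination_by ls => ls.length
decreasing_by
  · exact Nat.lt_succ_of_le (List.length_dropWhile_le _ _)
  · exact Nat.lt_succ_self _

def parse_cleaned_transcript_alt (cleaned_text : String) : List (List (String × String)) :=
  pvGo (pvLines cleaned_text)

-- ===== PRECONDITION & SPEC =====
def Spec_parse_cleaned_transcript (cleaned_text : String) (out : List (List (String × String))) : Prop := out = parse_cleaned_transcript_alt cleaned_text
instance (cleaned_text : String) (out : List (List (String × String))) : Decidable (Spec_parse_cleaned_transcript cleaned_text out) := by unfold Spec_parse_cleaned_transcript; infer_instance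

-- ===== CLAIM (what is proved, stated in full; the proofs are below) =====
def Claim_equal_parse_cleaned_transcript : Prop := ∀ (cleaned_text : String), Dom_parse_cleaned_transcript cleaned_text → Spec_parse_cleaned_transcript cleaned_text (parse_cleaned_transcript cleaned_text)

-- ===== LEMMAS AND PROOFS =====

-- the filtered stripped lines produced so far
def pvClean (raw : List String) : List String :=
  ((raw.map PySem.Str.strip).filter (fun s => s ≠ ""))

theorem pvGo_cons (l : String) (ls : List String) :
    pvGo (l :: ls) =
      if pvIsCmd l then
        pvMk (PySem.Str.strip (PySem.Str.slice l (some 1) none))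
             (PySem.Str.strip (PySem.Str.join "\n" (ls.takeWhile (fun x => !pvIsCmd x))))
          :: pvGo (ls.dropWhile (fun x => !pvIsCmd x))
      else pvGo ls := by
  rw [pvGo]

theorem pvGo_nil : pvGo [] = [] := by rw [pvGo]

-- Main invariant, both loop states at once:
-- with no pending command, A's remaining loop produces acc ++ pvGo (clean raw);
-- with pending command c and buffer out, it produces the flushed interaction followed by pvGo.
theorem pvMain (raw : List String) :
    (∀ acc out, pvFinishA (raw.foldl pvStepA (acc, none, out)) = acc ++ pvGo (pvClean raw)) ∧
    (∀ acc c out, pvFinishA (raw.foldl pvStepA (acc, some c, out)) =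
      acc ++ pvMk c (PySem.Str.strip (PySem.Str.join "\n"
                (out ++ (pvClean raw).takeWhile (fun x => !pvIsCmd x))))
          :: pvGo ((pvClean raw).dropWhile (fun x => !pvIsCmd x))) := by
  induction raw with
  | nil =>
    refine ⟨fun acc out => ?_, fun acc c out => ?_⟩
    · simp [pvFinishA, pvGo_nil, pvClean]
    · simp [pvFinishA, pvGo_nil, pvClean]
  | cons r rs ih =>
    have hclean : pvClean (r :: rs) =
        if PySem.Str.strip r = "" then pvClean rs
        else PySem.Str.strip r :: pvClean rs := by
      simp [pvClean]; split_ifs with h <;> simp [List.filter, h]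
    refine ⟨fun acc out => ?_, fun acc c out => ?_⟩
    · by_cases h0 : PySem.Str.strip r = ""
      · simp [List.foldl, pvStepA, h0, hclean, ih.1]
      · by_cases h1 : pvIsCmd (PySem.Str.strip r)
        · simp only [List.foldl, pvStepA, if_neg h0, if_pos h1]
          rw [ih.2, hclean, if_neg h0, pvGo_cons, if_pos h1]
          simp
        · simp only [List.foldl, pvStepA, if_neg h0, if_neg h1]
          rw [ih.1, hclean, if_neg h0, pvGo_cons, if_neg h1]
    · by_cases h0 : PySem.Str.strip r = ""
      · simp [List.foldl, pvStepA, h0, hclean, ih.2]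
      · by_cases h1 : pvIsCmd (PySem.Str.strip r)
        · simp only [List.foldl, pvStepA, if_neg h0, if_pos h1]
          rw [ih.2, hclean, if_neg h0, List.takeWhile_cons, List.dropWhile_cons]
          simp only [h1, Bool.not_true, Bool.false_eq_true, if_false]
          rw [pvGo_cons, if_pos h1]
          simp
        · simp only [List.foldl, pvStepA, if_neg h0, if_neg h1]
          rw [ih.2, hclean, if_neg h0]
          have h1' : (!pvIsCmd (PySem.Str.strip r)) = true := by
            simp [h1]
          rw [List.takeWhile_cons, List.dropWhile_cons, if_pos h1', if_pos h1']
          simp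

-- ===== VERDICT (by name: the statement is the Claim_ definition above) =====
theorem parse_cleaned_transcript_spec : Claim_equal_parse_cleaned_transcript := by
  intro cleaned_text _
  unfold Spec_parse_cleaned_transcript parse_cleaned_transcript parse_cleaned_transcript_alt
  have h := (pvMain ((PySem.Str.split? cleaned_text "\n").getD [])).1 [] []
  simpa [pvLines, pvClean] using h
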